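-- pv_equiv track=rewrite | github.com/CaioGMorata/Colheita | Backend/Hello_Flask/app.py | get_positions_in_vector
-- ===== SOURCE A (Python) =====
-- def get_positions_in_vector(m_forward, M: int):
--     vector_index = [] #Pega as posições dentro do vetor que já foram selecionadas para a primeira soma/intervalo.
--     i = 0
--     j = 0
--     while (i < len(m_forward)):
--         if (max(m_forward) == m_forward[i]):
--             while (j < M):
--                 vector_index.append(i)
--                 j+=1
--                 i+=1
--             break
--         i+=1
--     return vector_index
-- ===== SOURCE B (Python) =====
-- def get_positions_in_vector(m_forward, M: int):
--     best_idx = None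
--     best_val = None
--     for idx, v in enumerate(m_forward):
--         if best_val is None or v > best_val:
--             best_idx, best_val = idx, v
--     if best_idx is None:
--         return []
--     return list(range(best_idx, best_idx + M))
-- ===== Notes on version B (the rewrite author's own statement) =====
-- stated objective: faster
-- what changed: Replaced A's index-scanning while loop, which recomputes max(m_forward) on every iteration and fills the result with an inner append loop, by a single enumerate pass keeping (best_idx, best_val) and a final list(range(best_idx, best_idx+M)).
import Mathlib
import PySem

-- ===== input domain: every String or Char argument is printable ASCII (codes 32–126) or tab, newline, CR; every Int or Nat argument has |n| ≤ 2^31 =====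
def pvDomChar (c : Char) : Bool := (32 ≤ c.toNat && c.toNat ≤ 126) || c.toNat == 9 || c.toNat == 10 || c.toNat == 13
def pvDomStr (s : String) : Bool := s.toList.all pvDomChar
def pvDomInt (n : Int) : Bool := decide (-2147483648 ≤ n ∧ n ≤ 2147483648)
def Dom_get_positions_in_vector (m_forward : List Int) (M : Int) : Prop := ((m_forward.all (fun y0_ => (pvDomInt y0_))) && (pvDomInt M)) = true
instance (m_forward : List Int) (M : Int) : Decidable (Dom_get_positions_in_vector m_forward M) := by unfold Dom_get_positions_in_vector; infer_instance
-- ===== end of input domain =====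

-- B replaces A's index-scanning while loop (which recomputes max(m_forward) on every
-- iteration and runs an inner append loop) by a single argmax pass plus range;
-- objective: faster (drops the per-iteration max() scan).

-- ===== PORT A =====
-- inner 'while (j < M): append i; j+=1; i+=1'
def pvInnerA (i j M : Int) : List Int :=
  if h : j < M then i :: pvInnerA (i + 1) (j + 1) M else []
termination_by (M - j).toNat
decreasing_by omega

-- outer 'while (i < len(m_forward))' with the break replaced by returning the inner loop's list
def pvOuterA (m_forward : List Int) (M : Int) (i : Nat) : List Int :=
  if h : i < m_forward.length then
    if PySem.List.max? m_forward (fun x => x) = some m_forward[i] then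
      pvInnerA (i : Int) 0 M
    else
      pvOuterA m_forward M (i + 1)
  else []
termination_by m_forward.length - i

def get_positions_in_vector (m_forward : List Int) (M : Int) : List Int :=
  pvOuterA m_forward M 0

-- ===== PORT B =====
-- one fold over enumerate(m_forward): keep (best_idx, best_val), updating only on strictly greater
def pvBestB (ps : List (Int × Int)) (acc : Option (Int × Int)) : Option (Int × Int) :=
  ps.foldl (fun best p =>
    match best with
    | none => some p
    | some (bi, bv) => if bv < p.2 then some p else some (bi, bv)) acc

def get_positions_in_vector_alt (m_forward : List Int) (M : Int) : List Int :=
  match pvBestB (PySem.List.enumerate m_forward 0) none with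
  | none => []
  | some (bi, _) => PySem.List.pyRange bi (bi + M) 1

-- ===== PRECONDITION & SPEC =====
def Spec_get_positions_in_vector (m_forward : List Int) (M : Int) (out : List Int) : Prop := out = get_positions_in_vector_alt m_forward M
instance (m_forward : List Int) (M : Int) (out : List Int) : Decidable (Spec_get_positions_in_vector m_forward M out) := by unfold Spec_get_positions_in_vector; infer_instance

-- ===== CLAIM (what is proved, stated in full; the proofs are below) =====
def Claim_equal_get_positions_in_vector : Prop := ∀ (m_forward : List Int) (M : Int), Dom_get_positions_in_vector m_forward M → Spec_get_positions_in_vector m_forward M (get_positions_in_vector m_forward M)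

-- ===== LEMMAS AND PROOFS =====

-- the inner append loop builds the consecutive range
lemma pvInnerA_eq_pyRange (M : Int) : ∀ (i j : Int),
    pvInnerA i j M = PySem.List.pyRange i (i + (M - j)) 1 := by
  intro i j
  by_cases h : j < M
  · rw [pvInnerA, dif_pos h, pvInnerA_eq_pyRange M (i + 1) (j + 1)]
    have hb : i + 1 + (M - (j + 1)) = i + (M - j) := by ring
    rw [hb, ← PySem.List.pyRange_one_cons (by omega)]
  · rw [pvInnerA, dif_neg h, PySem.List.pyRange_one_eq_nil (by omega)]
termination_by _ j => (M - j).toNat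
decreasing_by omega

-- once the best value dominates the rest of the list, the fold keeps it
lemma pvBestB_stable : ∀ (xs : List Int) (s bi bv : Int),
    (∀ x ∈ xs, x ≤ bv) →
    pvBestB (PySem.List.enumerate xs s) (some (bi, bv)) = some (bi, bv) := by
  intro xs
  induction xs with
  | nil => intro s bi bv _; rfl
  | cons x t ih =>
    intro s bi bv hle
    have hx : ¬ bv < x := by
      have := hle x (by simp); omega
    simp only [PySem.List.enumerate_cons, pvBestB, List.foldl_cons, if_neg hx]
    exact ih (s + 1) bi bv (fun y hy => hle y (by simp [hy]))

-- if some element beats the accumulator, the fold lands on the first maximum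
lemma pvBestB_finds : ∀ (xs : List Int) (mx s bi bv : Int),
    mx ∈ xs → (∀ x ∈ xs, x ≤ mx) → bv < mx →
    pvBestB (PySem.List.enumerate xs s) (some (bi, bv)) =
      some (s + (xs.findIdx (fun x => x == mx) : Int), mx) := by
  intro xs
  induction xs with
  | nil => intro mx s bi bv hmem; exact absurd hmem (by simp)
  | cons x t ih =>
    intro mx s bi bv hmem hle hbv
    by_cases hx : x = mx
    · subst hx
      simp only [PySem.List.enumerate_cons, pvBestB, List.foldl_cons, if_pos hbv]
      have := pvBestB_stable t (s + 1) s x (fun y hy => hle y (by simp [hy]))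
      simp only [pvBestB] at this
      rw [this, List.findIdx_cons]
      simp
    · have hxlt : x < mx := by
        have := hle x (by simp); omega
      have hmt : mx ∈ t := by
        rcases List.mem_cons.mp hmem with h | h
        · exact absurd h.symm hx
        · exact h
      have hlt : ∀ y ∈ t, y ≤ mx := fun y hy => hle y (by simp [hy])
      rw [List.findIdx_cons]
      have hpx : (x == mx) = false := by simp [hx]
      simp only [hpx, cond_false]
      by_cases hup : bv < x
      · simp only [PySem.List.enumerate_cons, pvBestB, List.foldl_cons, if_pos hup]
        have := ih mx (s + 1) s x hmt hlt hxlt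
        simp only [pvBestB] at this
        rw [this]
        simp only [Option.some.injEq, Prod.mk.injEq, and_true]
        push_cast; omega
      · simp only [PySem.List.enumerate_cons, pvBestB, List.foldl_cons, if_neg hup]
        have := ih mx (s + 1) bi bv hmt hlt hbv
        simp only [pvBestB] at this
        rw [this]
        simp only [Option.some.injEq, Prod.mk.injEq, and_true]
        push_cast; omega

-- B on a nonempty list: the fold returns the first index of the maximum
lemma pvBestB_char (x : Int) (t : List Int) (mx : Int)
    (hmem : mx ∈ x :: t) (hle : ∀ y ∈ x :: t, y ≤ mx) :
    pvBestB (PySem.List.enumerate (x :: t) 0) none =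
      some ((((x :: t).findIdx (fun y => y == mx)) : Int), mx) := by
  simp only [PySem.List.enumerate_cons, pvBestB, List.foldl_cons]
  rw [List.findIdx_cons, show (0:Int) + 1 = 1 from by norm_num]
  by_cases hx : x = mx
  · subst hx
    have := pvBestB_stable t 1 0 x (fun y hy => hle y (by simp [hy]))
    simp only [pvBestB] at this
    rw [this]
    simp
  · have hxlt : x < mx := by have := hle x (by simp); omega
    have hmt : mx ∈ t := by
      rcases List.mem_cons.mp hmem with h | h
      · exact absurd h.symm hx
      · exact h
    have := pvBestB_finds t mx 1 0 x hmt (fun y hy => hle y (by simp [hy])) hxlt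
    simp only [pvBestB] at this
    rw [this]
    have hpx : (x == mx) = false := by simp [hx]
    simp only [hpx, cond_false]
    simp only [Option.some.injEq, Prod.mk.injEq, and_true]
    push_cast; omega

-- A's outer scan, started anywhere at or before the first maximum, stops exactly there
lemma pvOuterA_char (m : List Int) (M : Int) (k : Nat)
    (hk : k < m.length)
    (hkmax : PySem.List.max? m (fun x => x) = some m[k])
    (hbefore : ∀ j (hj : j < k), PySem.List.max? m (fun x => x) ≠ some (m[j]'(by omega))) :
    ∀ i, i ≤ k → pvOuterA m M i = pvInnerA (k : Int) 0 M := by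
  intro i hi
  by_cases hik : i = k
  · subst hik
    rw [pvOuterA, dif_pos hk, if_pos hkmax]
  · have hlt : i < k := by omega
    rw [pvOuterA, dif_pos (by omega), if_neg (hbefore i hlt)]
    exact pvOuterA_char m M k hk hkmax hbefore (i + 1) (by omega)
termination_by i _ => k - i
decreasing_by omega

-- ===== VERDICT (by name: the statement is the Claim_ definition above) =====
theorem get_positions_in_vector_spec : Claim_equal_get_positions_in_vector := by
  intro m M _
  unfold Spec_get_positions_in_vector
  cases m with
  | nil =>
    simp [get_positions_in_vector, get_positions_in_vector_alt, pvOuterA, pvBestB,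
      PySem.List.enumerate_nil]
  | cons x t =>
    obtain ⟨mx, hmx⟩ : ∃ mx, PySem.List.max? (x :: t) (fun x => x) = some mx := by
      cases h : PySem.List.max? (x :: t) (fun x => x) with
      | none => exact absurd ((PySem.List.max?_eq_none_iff _ _).mp h) (by simp)
      | some v => exact ⟨v, rfl⟩
    have hmem : mx ∈ x :: t := PySem.List.max?_mem hmx
    have hle : ∀ y ∈ x :: t, y ≤ mx := PySem.List.max?_isMax hmx
    set p : Int → Bool := fun y => y == mx with hp
    set k : Nat := (x :: t).findIdx p with hkdef
    have hklt : k < (x :: t).length :=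
      List.findIdx_lt_length_of_exists ⟨mx, hmem, by simp [hp]⟩
    have hkval : (x :: t)[k] = mx := by
      have := List.findIdx_getElem (xs := x :: t) (p := p) (w := hklt)
      simpa [hp] using this
    have hbefore : ∀ j (hj : j < k),
        PySem.List.max? (x :: t) (fun x => x) ≠ some ((x :: t)[j]'(by omega)) := by
      intro j hj heq
      have hne := List.not_of_lt_findIdx (p := p) (xs := x :: t) hj
      rw [hmx] at heq
      have : (x :: t)[j]'(by omega) = mx := by
        injection heq with h; omega
      exact absurd this (by simpa [hp] using hne)
    have hA : get_positions_in_vector (x :: t) M = pvInnerA (k : Int) 0 M := by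
      unfold get_positions_in_vector
      exact pvOuterA_char (x :: t) M k hklt (by rw [hmx, hkval]) hbefore 0 (by omega)
    have hB : get_positions_in_vector_alt (x :: t) M =
        PySem.List.pyRange (k : Int) ((k : Int) + M) 1 := by
      unfold get_positions_in_vector_alt
      rw [pvBestB_char x t mx hmem hle]
    rw [hA, hB, pvInnerA_eq_pyRange]
    norm_num
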